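-- pv_equiv track=rewrite | github.com/Aria-al/uscripts | Activités/Activite 09.py | mots
-- ===== SOURCE A (Python) =====
-- from typing import List, Set, Dict, Tuple
--
-- def decompose_ligne (li : str, sep : Set[str]) -> List[str] :
--     """
--     Decompose une ligne li selon un ensemble de separateurs sep
--     """
--     q : str = ""
--     m : List[str] = []
--     i: str
--     for i in li :
--         q = q + i
--         if i in sep :
--             if len(q) > 1 :
--                 m.append(q[:-1])
--             q = ""
--
--     return m
--
-- def est_majuscule (caract : str) -> bool :
--     """ Détermine si le caractrère est une lettre romaine majuscule"""
--     return 65 <= ord (caract) <= 90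
--
-- def minusculise_char (c : str) -> str :
--     """Décale le caractère c de n lettres si celui-ci est une lettre romaine, ne le décale pas sinon"""
--     cdecal : str = c
--     ind : int = ord(c) + 32
--     if est_majuscule(c) :
--         return chr(ind)
--     return cdecal
--
-- def minusculise (li : str) -> str :
--     """
--     Transforme l'ensemble des caracteres de li en son equivalent minuscule
--     """
--     newstr : str = ""
--     c : str
--     for c in li :
--         newstr = newstr + minusculise_char(c)
--     return newstr
--
-- def mots (lis : List[str], sep : Set[str]) -> List[str] :
--     """
--     Renvoie, a partir d'une liste lis constitue de lignes de caracteres, une liste de mots separes avec les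
--     caracteres sep en lettres minuscules
--     """
--     lit : List[List[str]] = [decompose_ligne(li, sep) for li in lis ]
--     listmot : List[str] = []
--     i : List[str]
--     u : str
--     for i in lit :
--         for u in i :
--             listmot.append(u)
--     return [minusculise(li) for li in listmot]
-- ===== SOURCE B (Python) =====
-- def mots(lis, sep):
--     """Split-then-filter tokenizer: split each line on the single-char separators,
--     drop the unterminated last segment, keep non-empty segments, lowercase A-Z only."""
--     seps = [s for s in sep if len(s) == 1]
--     lower = str.maketrans({chr(c): chr(c + 32) for c in range(65, 91)})
--     words = []
--     for li in lis:
--         parts = [li]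
--         for c in seps:
--             parts = [piece for part in parts for piece in part.split(c)]
--         words.extend(p.translate(lower) for p in parts[:-1] if p)
--     return words
-- ===== Notes on version B (the rewrite author's own statement) =====
-- stated objective: idiomatic
-- what changed: Replaces A's character-by-character accumulate-and-flush loop (plus a custom per-char lowercaser applied in a separate final map) with a split-then-filter pass: each line is split on the single-char separators via str.split, the unterminated last segment is dropped, empty segments are filtered out, and ASCII A-Z lowercasing is done by str.translate with a precomputed table.
import Mathlib
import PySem

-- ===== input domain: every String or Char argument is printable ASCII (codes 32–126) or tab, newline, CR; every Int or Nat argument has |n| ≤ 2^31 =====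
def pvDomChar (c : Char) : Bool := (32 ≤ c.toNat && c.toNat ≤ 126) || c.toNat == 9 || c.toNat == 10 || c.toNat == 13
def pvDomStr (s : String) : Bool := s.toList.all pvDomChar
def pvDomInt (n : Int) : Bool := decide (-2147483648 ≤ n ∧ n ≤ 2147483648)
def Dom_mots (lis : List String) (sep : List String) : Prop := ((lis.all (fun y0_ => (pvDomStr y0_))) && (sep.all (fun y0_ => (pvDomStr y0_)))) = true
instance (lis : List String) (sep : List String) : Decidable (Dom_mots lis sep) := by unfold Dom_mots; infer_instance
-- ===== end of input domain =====

-- B replaces A's accumulate-and-flush char loop by split / drop-last / filter / translate (idiomatic, same cost).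

-- ===== PORT A =====
-- strings are handled as their char lists (exact: Python strings are char sequences)

-- the for-loop of decompose_ligne, state (q, m)
def pvDlLoop (sep : List String) : List Char → List Char → List (List Char) → List (List Char)
  | [], _, m => m
  | i :: rest, q, m =>
    let q' := q ++ [i]                                  -- q = q + i
    if sep.contains (String.ofList [i]) then                -- if i in sep
      pvDlLoop sep rest []
        (if q'.length > 1 then m ++ [q'.dropLast] else m)   -- if len(q)>1: m.append(q[:-1]); q = ""
    else pvDlLoop sep rest q' m

def decompose_ligne (li : String) (sep : List String) : List String :=
  (pvDlLoop sep li.toList [] []).map String.ofList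

def est_majuscule (caract : Char) : Bool := 65 ≤ caract.toNat && caract.toNat ≤ 90

def minusculise_char (c : Char) : Char :=
  if est_majuscule c then Char.ofNat (c.toNat + 32) else c   -- chr(ord(c)+32), in-range since c ≤ 'Z'

def minusculise (li : String) : String :=
  String.ofList (li.toList.foldl (fun acc c => acc ++ [minusculise_char c]) [])

def mots (lis : List String) (sep : List String) : List String :=
  let lit := lis.map (fun li => decompose_ligne li sep)
  let listmot := lit.foldl (fun acc i => i.foldl (fun a u => a ++ [u]) acc) []
  listmot.map minusculise

-- ===== PORT B =====
-- port of Python str.split(c) for a one-char separator c, stated for a char predicate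
-- (exact: splits at every char satisfying p, keeping empty segments)
def pySplitP (p : Char → Bool) : List Char → List (List Char)
  | [] => [[]]
  | a :: t =>
    if p a then [] :: pySplitP p t
    else
      match pySplitP p t with
      | [] => [[a]]          -- unreachable: pySplitP never returns []
      | h :: tl => (a :: h) :: tl

-- port of p.translate(lower) with the A..Z -> a..z table
def pvTranslateLower (w : List Char) : List Char :=
  w.map (fun c => if 65 ≤ c.toNat && c.toNat ≤ 90 then Char.ofNat (c.toNat + 32) else c)

def mots_alt (lis : List String) (sep : List String) : List String :=
  let seps := sep.filter (fun s => PySem.Str.len s == 1)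
  lis.flatMap (fun li =>
    let parts := seps.foldl
      (fun ps s => ps.flatMap (fun part => pySplitP (fun a => a == s.toList.headI) part))
      [li.toList]
    (parts.dropLast.filter (fun p => !p.isEmpty)).map (fun p => String.ofList (pvTranslateLower p)))

-- ===== PRECONDITION & SPEC =====
def Spec_mots (lis : List String) (sep : List String) (out : List String) : Prop := out = mots_alt lis sep
instance (lis : List String) (sep : List String) (out : List String) : Decidable (Spec_mots lis sep out) := by unfold Spec_mots; infer_instance

-- ===== CLAIM (what is proved, stated in full; the proofs are below) =====
def Claim_equal_mots : Prop := ∀ (lis : List String) (sep : List String), Dom_mots lis sep → Spec_mots lis sep (mots lis sep)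

-- ===== LEMMAS AND PROOFS =====

theorem pySplitP_ne_nil (p : Char → Bool) (l : List Char) : pySplitP p l ≠ [] := by
  cases l with
  | nil => simp [pySplitP]
  | cons a t =>
    simp only [pySplitP]
    split
    · simp
    · cases h : pySplitP p t <;> simp

theorem pySplitP_congr (p q : Char → Bool) (l : List Char) (h : ∀ a, p a = q a) :
    pySplitP p l = pySplitP q l := by
  induction l with
  | nil => rfl
  | cons a t ih => simp only [pySplitP, h a, ih]

theorem pySplitP_false (l : List Char) : pySplitP (fun _ => false) l = [l] := by
  induction l with
  | nil => rfl
  | cons a t ih => simp [pySplitP, ih]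

-- splitting on p then splitting every piece on q = splitting on (p or q)
theorem pySplitP_union (p q : Char → Bool) (l : List Char) :
    (pySplitP p l).flatMap (pySplitP q) = pySplitP (fun a => p a || q a) l := by
  induction l with
  | nil => simp [pySplitP]
  | cons a t ih =>
    rcases hps : pySplitP p t with _ | ⟨h1, tl⟩
    · exact absurd hps (pySplitP_ne_nil p t)
    by_cases hp : p a = true
    · have e1 : pySplitP p (a :: t) = [] :: pySplitP p t := by simp [pySplitP, hp]
      have e3 : pySplitP (fun x => p x || q x) (a :: t)
          = [] :: pySplitP (fun x => p x || q x) t := by simp [pySplitP, hp]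
      rw [e1, List.flatMap_cons, ih, e3]
      rfl
    · by_cases hq : q a = true
      · have e1 : pySplitP p (a :: t) = (a :: h1) :: tl := by simp [pySplitP, hp, hps]
        have e2 : pySplitP q (a :: h1) = [] :: pySplitP q h1 := by simp [pySplitP, hq]
        have e3 : pySplitP (fun x => p x || q x) (a :: t)
            = [] :: pySplitP (fun x => p x || q x) t := by simp [pySplitP, hp, hq]
        rw [e1, List.flatMap_cons, e2, e3, ← ih, hps, List.flatMap_cons]
        simp
      · rcases hqs : pySplitP q h1 with _ | ⟨g1, gl⟩
        · exact absurd hqs (pySplitP_ne_nil q h1)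
        have e1 : pySplitP p (a :: t) = (a :: h1) :: tl := by simp [pySplitP, hp, hps]
        have e2 : pySplitP q (a :: h1) = (a :: g1) :: gl := by simp [pySplitP, hq, hqs]
        have e4 : pySplitP (fun x => p x || q x) t
            = g1 :: (gl ++ List.flatMap (pySplitP q) tl) := by
          rw [← ih, hps, List.flatMap_cons, hqs]; simp
        have e3 : pySplitP (fun x => p x || q x) (a :: t)
            = (a :: g1) :: (gl ++ List.flatMap (pySplitP q) tl) := by
          simp [pySplitP, hp, hq, e4]
        rw [e1, List.flatMap_cons, e2, e3]
        simp

-- the successive-split fold computes the simultaneous split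
theorem foldl_split (cs : List String) (ps : List (List Char)) :
    cs.foldl (fun ps s => ps.flatMap (fun part => pySplitP (fun a => a == s.toList.headI) part)) ps
      = ps.flatMap (pySplitP (fun a => cs.any (fun s => a == s.toList.headI))) := by
  induction cs generalizing ps with
  | nil =>
    simp only [List.foldl_nil]
    have h : (pySplitP fun a => ([] : List String).any (fun s => a == s.toList.headI))
        = fun l => [l] := by
      funext l
      rw [pySplitP_congr _ (fun _ => false) l (by simp), pySplitP_false]
    rw [h]
    simp
  | cons c cs ih =>
    simp only [List.foldl_cons]
    rw [ih]
    rw [List.flatMap_assoc]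
    congr 1
    funext part
    rw [pySplitP_union]
    apply pySplitP_congr
    intro a
    simp

-- membership of the one-char string in sep = membership of the char among the one-char separators
theorem contains_singleton_eq (sep : List String) (a : Char) :
    sep.contains (String.ofList [a])
      = (sep.filter (fun s => PySem.Str.len s == 1)).any (fun s => a == s.toList.headI) := by
  induction sep with
  | nil => rfl
  | cons s rest ih =>
    obtain ⟨l, rfl⟩ : ∃ l, s = String.ofList l := ⟨s.toList, (String.ofList_toList).symm⟩
    have key : (String.ofList [a] == String.ofList l)
        = (PySem.Str.len (String.ofList l) == 1 && a == (String.ofList l).toList.headI) := by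
      rcases l with _ | ⟨c, cs⟩
      · simp [PySem.Str.len]
      · rcases cs with _ | ⟨d, ds⟩
        · simp [PySem.Str.len, String.ofList_inj, eq_comm]
        · have h1 : (String.ofList [a] == String.ofList (c :: d :: ds)) = false := by
            simp [String.ofList_inj]
          have h2 : ((PySem.Str.len (String.ofList (c :: d :: ds))) == 1) = false := by
            simp [PySem.Str.len]
            omega
          rw [h1, h2, Bool.false_and]
    cases hlen : (PySem.Str.len (String.ofList l) == 1) with
    | false =>
      have klhs : (String.ofList [a] == String.ofList l) = false := by
        rw [key, hlen, Bool.false_and]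
      rw [List.contains_cons, List.filter_cons, hlen, klhs, ih]
      simp
    | true =>
      rw [List.contains_cons, List.filter_cons, hlen, key, hlen, Bool.true_and, ih]
      simp [List.any_cons]

theorem modifyHead_nil_append (l : List (List Char)) : l.modifyHead (fun x => [] ++ x) = l := by
  cases l <;> simp

-- A's loop in terms of the simultaneous split
theorem pvDlLoop_eq (sep : List String) (cs q : List Char) (m : List (List Char)) :
    pvDlLoop sep cs q m
      = m ++ (((pySplitP (fun a => sep.contains (String.ofList [a])) cs).modifyHead (q ++ ·)).dropLast.filter
          (fun p => !p.isEmpty)) := by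
  induction cs generalizing q m with
  | nil => simp [pvDlLoop, pySplitP]
  | cons i rest ih =>
    by_cases hp : sep.contains (String.ofList [i]) = true
    · have hnn := pySplitP_ne_nil (fun a => sep.contains (String.ofList [a])) rest
      simp only [pvDlLoop, hp, if_pos]
      rw [ih, modifyHead_nil_append]
      rw [show pySplitP (fun a => sep.contains (String.ofList [a])) (i :: rest)
            = [] :: pySplitP (fun a => sep.contains (String.ofList [a])) rest from by
          simp only [pySplitP]
          rw [if_pos hp]]
      rw [List.modifyHead_cons, List.dropLast_cons_of_ne_nil hnn]
      simp only [List.filter_cons]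
      rcases q with _ | ⟨c, cq⟩
      · simp
      · have h2 : ((c :: cq) ++ [i]).length > 1 := by simp
        have hd : ((c :: cq) ++ [i]).dropLast = c :: cq := List.dropLast_concat ..
        simp only [h2, hd, if_pos]
        simp
    · simp only [pvDlLoop, hp]
      simp only [Bool.false_eq_true, if_false]
      rw [ih]
      have hnn := pySplitP_ne_nil (fun a => sep.contains (String.ofList [a])) rest
      cases h : pySplitP (fun a => sep.contains (String.ofList [a])) rest with
      | nil => exact absurd h hnn
      | cons h1 tl =>
        simp only [pySplitP, hp, Bool.false_eq_true, if_false, h, List.modifyHead_cons]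
        simp

-- nested append loop = flatten
theorem foldl_snoc (i : List String) (acc : List String) :
    i.foldl (fun a u => a ++ [u]) acc = acc ++ i := by
  induction i generalizing acc with
  | nil => simp
  | cons x t ih => simp [ih]

theorem foldl_flatten (lit : List (List String)) (acc : List String) :
    lit.foldl (fun acc i => i.foldl (fun a u => a ++ [u]) acc) acc = acc ++ lit.flatten := by
  induction lit generalizing acc with
  | nil => simp
  | cons x t ih =>
    rw [List.foldl_cons, foldl_snoc, ih]
    simp

theorem foldl_map_snoc (l : List Char) (acc : List Char) :
    l.foldl (fun acc c => acc ++ [minusculise_char c]) acc = acc ++ l.map minusculise_char := by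
  induction l generalizing acc with
  | nil => simp
  | cons x t ih => simp [ih]

theorem minusculise_mk (w : List Char) : minusculise (String.ofList w) = String.ofList (pvTranslateLower w) := by
  unfold minusculise pvTranslateLower
  rw [show (String.ofList w).toList = w from String.toList_ofList, foldl_map_snoc]
  simp only [List.nil_append]
  have h : ∀ c ∈ w, minusculise_char c
      = (fun c : Char => if 65 ≤ c.toNat && c.toNat ≤ 90 then Char.ofNat (c.toNat + 32) else c) c := by
    intro c _
    simp [minusculise_char, est_majuscule]
  rw [List.map_congr_left h]

-- ===== VERDICT (by name: the statement is the Claim_ definition above) =====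
theorem mots_spec : Claim_equal_mots := by
  intro lis sep _
  have hline : (fun li : String => (decompose_ligne li sep).map minusculise)
      = (fun li : String =>
          (((sep.filter (fun s => PySem.Str.len s == 1)).foldl
              (fun ps s => ps.flatMap (fun part => pySplitP (fun a => a == s.toList.headI) part))
              [li.toList]).dropLast.filter (fun p => !p.isEmpty)).map
            (fun p => String.ofList (pvTranslateLower p))) := by
    funext li
    rw [foldl_split]
    unfold decompose_ligne
    rw [pvDlLoop_eq, modifyHead_nil_append]
    rw [List.flatMap_cons]
    simp only [List.flatMap_nil, List.append_nil, List.nil_append]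
    rw [pySplitP_congr (fun a => (sep.filter (fun s => PySem.Str.len s == 1)).any (fun s => a == s.toList.headI))
          (fun a => sep.contains (String.ofList [a])) li.toList
          (fun a => (contains_singleton_eq sep a).symm)]
    rw [List.map_map]
    exact List.map_congr_left (fun w _ => minusculise_mk w)
  show mots lis sep = mots_alt lis sep
  unfold mots mots_alt
  show ((lis.map (fun li => decompose_ligne li sep)).foldl
          (fun acc i => i.foldl (fun a u => a ++ [u]) acc) []).map minusculise
      = lis.flatMap (fun li =>
          (((sep.filter (fun s => PySem.Str.len s == 1)).foldl
              (fun ps s => ps.flatMap (fun part => pySplitP (fun a => a == s.toList.headI) part))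
              [li.toList]).dropLast.filter (fun p => !p.isEmpty)).map
            (fun p => String.ofList (pvTranslateLower p)))
  rw [foldl_flatten]
  simp only [List.nil_append]
  rw [show ((lis.map fun li => decompose_ligne li sep).flatten)
        = lis.flatMap (fun li => decompose_ligne li sep) from (List.flatMap_def ..).symm]
  rw [List.map_flatMap]
  rw [hline]
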